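-- pv_equiv track=rewrite | github.com/BASILJACOB123/codejam_codes | aes_encryption.py | twofunction
-- ===== SOURCE A (Python) =====
-- hexx={'0':'0000','1':'0001','2':'0010','3':'0011','4':'0100','5':'0101','6':'0110','7':'0111','8':'1000','9':'1001','A':'1010','B':'1011','C':'1100','D':'1101','E':'1110','F':'1111'}
--
-- def bin2hex(val):
--     var1=""
--     var2=""
--     var1=str(val[0])+str(val[1])+str(val[2])+str(val[3])
--     for key,value in hexx.items():
--         if var1==value:
--             var2+=key
--     return var2
--
-- def twofunction(val):
--     t2=[0,0,0,1,1,0,1,1]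
--     temp1=hexx[val[0]]
--     temp2=hexx[val[1]]
--     temp=list(temp1+temp2)
--     t1=temp[0]
--     for i in range(1,8):
--         temp[i-1]=temp[i]
--     temp[7]='0'
--     if(t1=='1'):
--         for i in range(0,8):
--             temp[i]=str(int(temp[i])^t2[i])
--     ll=bin2hex(temp[0:4])
--     rr=bin2hex(temp[4:8])
--     temp=ll+rr
--     return temp
-- ===== SOURCE B (Python) =====
-- hexx={'0':'0000','1':'0001','2':'0010','3':'0011','4':'0100','5':'0101','6':'0110','7':'0111','8':'1000','9':'1001','A':'1010','B':'1011','C':'1100','D':'1101','E':'1110','F':'1111'}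
--
-- _HEXVAL = {'0':0,'1':1,'2':2,'3':3,'4':4,'5':5,'6':6,'7':7,'8':8,'9':9,'A':10,'B':11,'C':12,'D':13,'E':14,'F':15}
--
-- def twofunction(val):
--     b = 16 * _HEXVAL[val[0]] + _HEXVAL[val[1]]
--     out = ((b << 1) & 0xFF) ^ (0x1B if (b & 0x80) else 0)
--     return format(out, '02X')
-- ===== Notes on version B (the rewrite author's own statement) =====
-- stated objective: simpler
-- what changed: B parses the two hex digits to an integer byte via a char-to-value dict and computes the xtime transform with closed-form bit arithmetic (((b<<1)&0xFF)^(0x1B if b&0x80 else 0)) formatted back as two uppercase hex digits, replacing A's per-bit list shift loop, per-bit xor loop and linear bin2hex table scans.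
import Mathlib
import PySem

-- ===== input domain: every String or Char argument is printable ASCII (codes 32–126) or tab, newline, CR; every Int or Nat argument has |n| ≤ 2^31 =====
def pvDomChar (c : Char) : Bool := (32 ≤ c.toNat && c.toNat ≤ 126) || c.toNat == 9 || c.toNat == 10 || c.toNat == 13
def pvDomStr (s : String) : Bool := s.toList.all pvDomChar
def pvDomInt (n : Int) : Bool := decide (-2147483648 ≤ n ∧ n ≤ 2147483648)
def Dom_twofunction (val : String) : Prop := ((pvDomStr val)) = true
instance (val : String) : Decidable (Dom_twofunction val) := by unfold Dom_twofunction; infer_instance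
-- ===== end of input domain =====

-- B replaces A's per-bit list-shift loop and linear bin2hex table scan by closed-form
-- integer bit arithmetic on the parsed byte (objective: simpler/idiomatic).

-- ===== PORT A =====
def hexxD : PySem.Dict String String := PySem.Dict.ofList
  [("0","0000"),("1","0001"),("2","0010"),("3","0011"),("4","0100"),("5","0101"),
   ("6","0110"),("7","0111"),("8","1000"),("9","1001"),("A","1010"),("B","1011"),
   ("C","1100"),("D","1101"),("E","1110"),("F","1111")]

-- bin2hex: builds var1 from the four entries, then scans hexx.items() appending matching keys
def bin2hexA (v : List Char) : String :=
  match PySem.List.pyGet? v 0, PySem.List.pyGet? v 1, PySem.List.pyGet? v 2, PySem.List.pyGet? v 3 with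
  | some a, some b, some c, some d =>
    let var1 := String.mk [a, b, c, d]
    hexxD.items.foldl (fun var2 kv => if var1 == kv.2 then var2 ++ kv.1 else var2) ""
  | _, _, _, _ => ""   -- IndexError path (unreachable under Pre_)

-- transliteration of A; the `none`/missing-key branches are Python's IndexError/KeyError,
-- excluded by Pre_.  int(c)^t2[i] then str(): exact for the '0'/'1' chars this code reaches.
def twofunctionA_core (v0 v1 : Char) : String :=
  let t2 : List Int := [0,0,0,1,1,0,1,1]
  match hexxD.get? (String.singleton v0), hexxD.get? (String.singleton v1) with
    | some temp1, some temp2 =>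
      let temp := (temp1 ++ temp2).toList
      match PySem.List.pyGet? temp 0 with
      | some t1 =>
        let temp := (PySem.List.pyRange 1 8 1).foldl
          (fun t i => t.set (i-1).toNat (t.getD i.toNat ' ')) temp
        let temp := temp.set 7 '0'
        let temp := if t1 == '1' then
            (PySem.List.pyRange 0 8 1).foldl
              (fun t i =>
                t.set i.toNat
                  (if (PySem.Int.bxor (if t.getD i.toNat ' ' == '1' then (1 : Int) else 0) (t2.getD i.toNat 0)) == 1
                   then '1' else '0')) temp
          else temp
        let ll := bin2hexA (PySem.List.slice temp (some 0) (some 4))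
        let rr := bin2hexA (PySem.List.slice temp (some 4) (some 8))
        ll ++ rr
      | none => ""
    | _, _ => ""

def twofunction (val : String) : String :=
  match PySem.Str.pyGet? val 0, PySem.Str.pyGet? val 1 with
  | some v0, some v1 => twofunctionA_core v0 v1
  | _, _ => ""

-- ===== PORT B =====
def hexValD : PySem.Dict Char Int := PySem.Dict.ofList
  [('0',0),('1',1),('2',2),('3',3),('4',4),('5',5),('6',6),('7',7),
   ('8',8),('9',9),('A',10),('B',11),('C',12),('D',13),('E',14),('F',15)]

-- format(out, '02X'): exact for 0 ≤ n ≤ 255 (the only values B produces)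
def fmt02X (n : Int) : String :=
  let digs := "0123456789ABCDEF".toList
  String.mk [digs.getD (PySem.Int.floordiv n 16).toNat '0', digs.getD (PySem.Int.mod n 16).toNat '0']

def twofunctionB_core (c0 c1 : Char) : String :=
  match hexValD.get? c0, hexValD.get? c1 with
  | some h, some l =>
    let b : Int := 16 * h + l
    let out := PySem.Int.bxor (PySem.Int.band (b <<< (1:Nat)) 255) (if PySem.Int.band b 128 ≠ 0 then 27 else 0)
    fmt02X out
  | _, _ => ""   -- KeyError path (unreachable under Pre_)

def twofunction_alt (val : String) : String :=
  match PySem.Str.pyGet? val 0, PySem.Str.pyGet? val 1 with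
  | some c0, some c1 => twofunctionB_core c0 c1
  | _, _ => ""   -- IndexError path (unreachable under Pre_)

-- ===== PRECONDITION & SPEC =====
def hexChars : List Char := ['0','1','2','3','4','5','6','7','8','9','A','B','C','D','E','F']

-- Pre_: the first two characters exist and are uppercase hex digits; otherwise A raises
-- IndexError / KeyError (no return value).
def Pre_twofunction (val : String) : Prop :=
  2 ≤ val.toList.length ∧ ((val.toList.take 2).all (fun c => hexChars.contains c)) = true
instance (val : String) : Decidable (Pre_twofunction val) := by unfold Pre_twofunction; infer_instance

def pvWitness_twofunction : String := "80"

def Spec_twofunction (val : String) (out : String) : Prop := out = twofunction_alt val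
instance (val : String) (out : String) : Decidable (Spec_twofunction val out) := by unfold Spec_twofunction; infer_instance

-- ===== CLAIM (what is proved, stated in full; the proofs are below) =====
def Claim_equal_twofunction : Prop := ∀ (val : String), Dom_twofunction val → Pre_twofunction val → Spec_twofunction val (twofunction val)

-- ===== LEMMAS AND PROOFS =====

-- reduce each port to its core once the first two characters are known
theorem twofunction_eq_core (val : String) (c0 c1 : Char)
    (h0 : PySem.Str.pyGet? val 0 = some c0) (h1 : PySem.Str.pyGet? val 1 = some c1) :
    twofunction val = twofunctionA_core c0 c1 := by
  unfold twofunction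
  rw [h0, h1]

theorem twofunction_alt_eq_core (val : String) (c0 c1 : Char)
    (h0 : PySem.Str.pyGet? val 0 = some c0) (h1 : PySem.Str.pyGet? val 1 = some c1) :
    twofunction_alt val = twofunctionB_core c0 c1 := by
  unfold twofunction_alt
  rw [h0, h1]

-- the two ports agree once both first characters are fixed hex digits: finite check
set_option maxRecDepth 10000 in
set_option maxHeartbeats 4000000 in
theorem core_eq : ∀ c0 ∈ hexChars, ∀ c1 ∈ hexChars,
    twofunctionA_core c0 c1 = twofunctionB_core c0 c1 := by
  intro c0 h0 c1 h1
  simp only [hexChars, List.mem_cons, List.not_mem_nil, or_false] at h0 h1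
  rcases h0 with rfl|rfl|rfl|rfl|rfl|rfl|rfl|rfl|rfl|rfl|rfl|rfl|rfl|rfl|rfl|rfl <;>
    rcases h1 with rfl|rfl|rfl|rfl|rfl|rfl|rfl|rfl|rfl|rfl|rfl|rfl|rfl|rfl|rfl|rfl <;>
      decide

-- ===== VERDICT (by name: the statement is the Claim_ definition above) =====
theorem twofunction_spec : Claim_equal_twofunction := by
  intro val _ hpre
  unfold Spec_twofunction
  obtain ⟨hlen, hall⟩ := hpre
  rcases hl : val.toList with _ | ⟨c0, _ | ⟨c1, rest⟩⟩ <;> rw [hl] at hlen <;> simp at hlen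
  rw [hl] at hall
  simp only [List.take_succ_cons, List.take_zero, List.all_cons, List.all_nil,
    Bool.and_true, Bool.and_eq_true, List.contains_iff_mem] at hall
  have h0 : PySem.Str.pyGet? val 0 = some c0 := by
    simp only [PySem.Str.pyGet?_eq, PySem.Chars.pyGet?_eq_listPyGet?, hl]
    rw [PySem.List.pyGet?_zero_cons]
  have h1 : PySem.Str.pyGet? val 1 = some c1 := by
    simp only [PySem.Str.pyGet?_eq, PySem.Chars.pyGet?_eq_listPyGet?, hl]
    rw [show (1:Int) = ((1:Nat):Int) from rfl, PySem.List.pyGet?_natCast]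
    simp
  rw [twofunction_eq_core val c0 c1 h0 h1, twofunction_alt_eq_core val c0 c1 h0 h1]
  exact core_eq c0 hall.1 c1 hall.2
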